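-- pv_equiv track=rewrite | github.com/luichinni/TTPS-Tenicas-y-Estrategias | MAXSUMSQ - Presentación/maxsumsq.py | max_sum_sq
-- ===== SOURCE A (Python) =====
-- class Maximo:
--     def __init__(self):
--         # maximo 1 por debajo del minimo posible
--         self.max_sum = -1000000001
--         self.cantidad = 0
--
--     def comprobar(self, value):
--         if value > self.max_sum:
--             self.max_sum = value
--             self.cantidad = 1
--         elif value == self.max_sum:
--             self.cantidad += 1
--
--     def get_rta(self):
--         return "{} {}".format(self.max_sum, self.cantidad)
--
-- def max_sum_sq(nros):
--     sumas = []
--     m = Maximo()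
--
--     for nro in nros:
--         for I in range(len(sumas)):
--             # sumas acumuladas
--             sumas[I] += nro
--             m.comprobar(sumas[I])
--
--         m.comprobar(nro)
--         sumas.append(nro)
--
--     return m.get_rta()
-- ===== SOURCE B (Python) =====
-- def max_sum_sq(nros):
--     # pass 1: max contiguous-subarray sum via prefix sums and a running min prefix
--     best = -1000000001
--     p = 0
--     mn = 0
--     for x in nros:
--         p += x
--         if p - mn > best:
--             best = p - mn
--         if p < mn:
--             mn = p
--     # pass 2: count subarrays with sum == best via a hashmap of prefix-sum occurrences
--     cnt = 0
--     p = 0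
--     seen = {0: 1}
--     for x in nros:
--         p += x
--         cnt += seen.get(p - best, 0)
--         seen[p] = seen.get(p, 0) + 1
--     return "{} {}".format(best, cnt)
-- ===== Notes on version B (the rewrite author's own statement) =====
-- stated objective: faster
-- what changed: A keeps a list of all running subarray sums and updates every one of them for each new element (quadratic); B makes two linear passes over prefix sums: a running-min-prefix (Kadane-style) pass to find the maximum subarray sum, then a hashmap of prefix-sum occurrences to count the subarrays achieving it.
import Mathlib
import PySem

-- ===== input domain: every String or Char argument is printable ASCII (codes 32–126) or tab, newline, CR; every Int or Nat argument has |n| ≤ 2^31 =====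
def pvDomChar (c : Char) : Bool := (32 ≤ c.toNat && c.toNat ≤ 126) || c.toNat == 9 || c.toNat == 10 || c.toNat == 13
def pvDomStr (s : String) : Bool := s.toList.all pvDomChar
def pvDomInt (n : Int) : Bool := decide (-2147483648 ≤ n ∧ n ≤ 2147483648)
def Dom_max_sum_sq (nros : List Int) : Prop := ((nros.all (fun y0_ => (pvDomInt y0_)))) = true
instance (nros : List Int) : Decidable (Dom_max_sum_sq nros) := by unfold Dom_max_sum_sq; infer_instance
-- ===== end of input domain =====

-- B replaces A's quadratic scan over all subarray sums by a two-pass prefix-sum method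
-- (running-min prefix for the maximum, a hashmap of prefix-sum occurrences for the count);
-- objective: faster (O(n^2) -> O(n)).

-- ===== PORT A =====
-- Maximo.comprobar: state (max_sum, cantidad)
def pvComprobar (m : Int × Int) (v : Int) : Int × Int :=
  if v > m.1 then (v, 1) else if v = m.1 then (m.1, m.2 + 1) else m

-- body of A's inner 'for I in range(len(sumas))' loop; state (sumas, m)
def pvInnerStep (nro : Int) (q : List Int × Int × Int) (I : Int) : List Int × Int × Int :=
  let s := PySem.List.pySetD q.1 I (PySem.List.pyGetD q.1 I 0 + nro)
  (s, pvComprobar q.2 (PySem.List.pyGetD s I 0))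

-- body of A's outer 'for nro in nros' loop
def pvAStep (st : List Int × Int × Int) (nro : Int) : List Int × Int × Int :=
  let inner := (PySem.List.pyRange 0 (st.1.length : Int) 1).foldl (pvInnerStep nro) st
  (inner.1 ++ [nro], pvComprobar inner.2 nro)

def max_sum_sq (nros : List Int) : String :=
  let st := nros.foldl pvAStep ([], -1000000001, 0)
  PySem.Int.toStr st.2.1 ++ " " ++ PySem.Int.toStr st.2.2

-- ===== PORT B =====
-- pass 1 body: state (best, p, mn)
def pvB1 (st : Int × Int × Int) (x : Int) : Int × Int × Int :=
  let p := st.2.1 + x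
  let best := if p - st.2.2 > st.1 then p - st.2.2 else st.1
  let mn := if p < st.2.2 then p else st.2.2
  (best, p, mn)

-- pass 2 body: state (cnt, p, seen)
def pvB2 (best : Int) (st : Int × Int × PySem.Dict Int Int) (x : Int) :
    Int × Int × PySem.Dict Int Int :=
  let p := st.2.1 + x
  let cnt := st.1 + st.2.2.getD (p - best) 0
  let seen := st.2.2.insert p (st.2.2.getD p 0 + 1)
  (cnt, p, seen)

def max_sum_sq_alt (nros : List Int) : String :=
  let best := (nros.foldl pvB1 (-1000000001, 0, 0)).1
  let cnt := (nros.foldl (pvB2 best) (0, 0, PySem.Dict.empty.insert 0 1)).1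
  PySem.Int.toStr best ++ " " ++ PySem.Int.toStr cnt

-- ===== PRECONDITION & SPEC =====
def Spec_max_sum_sq (nros : List Int) (out : String) : Prop := out = max_sum_sq_alt nros
instance (nros : List Int) (out : String) : Decidable (Spec_max_sum_sq nros out) := by unfold Spec_max_sum_sq; infer_instance

-- ===== CLAIM (what is proved, stated in full; the proofs are below) =====
def Claim_equal_max_sum_sq : Prop := ∀ (nros : List Int), Dom_max_sum_sq nros → Spec_max_sum_sq nros (max_sum_sq nros)

-- ===== LEMMAS AND PROOFS =====

-- prefix sums P[0..len l - 1] (all but the total)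
def pvPrefs : List Int → List Int
  | [] => []
  | x :: t => 0 :: (pvPrefs t).map (fun y => x + y)

-- sums of the suffixes of l, in order of their start index (= A's 'sumas' after l)
def pvRow (l : List Int) : List Int := (pvPrefs l).map (fun y => l.sum - y)

-- the sequence of all subarray-sum values, in the order A feeds them to comprobar
def pvFeedRev : List Int → List Int
  | [] => []
  | x :: t => pvFeedRev t ++ pvRow (x :: t).reverse

def pvFeed (l : List Int) : List Int := pvFeedRev l.reverse

-- prefix sums P[1..len l] (the nonempty ones, in order)
def pvNpp (l : List Int) : List Int := (pvPrefs l ++ [l.sum]).tail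

theorem pvPrefs_append (l : List Int) (x : Int) :
    pvPrefs (l ++ [x]) = pvPrefs l ++ [l.sum] := by
  induction l with
  | nil => simp [pvPrefs]
  | cons y t ih => simp [pvPrefs, ih, List.map_append]

theorem pvPrefs_sum_eq (l : List Int) : pvPrefs l ++ [l.sum] = 0 :: pvNpp l := by
  cases l <;> simp [pvPrefs, pvNpp]

theorem pvNpp_append (l : List Int) (x : Int) :
    pvNpp (l ++ [x]) = pvNpp l ++ [(l ++ [x]).sum] := by
  simp only [pvNpp, pvPrefs_append]
  rw [show pvPrefs l ++ [l.sum] ++ [(l ++ [x]).sum]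
        = (0 :: pvNpp l) ++ [(l ++ [x]).sum] by rw [pvPrefs_sum_eq]]
  simp [pvNpp]

theorem pvRow_append (l : List Int) (x : Int) :
    pvRow (l ++ [x]) = (pvRow l).map (fun v => v + x) ++ [x] := by
  simp only [pvRow, pvPrefs_append, List.map_append, List.map_map, List.sum_append]
  congr 1
  · refine List.map_congr_left fun y _ => ?_
    simp only [Function.comp, List.sum_cons, List.sum_nil]
    ring
  · simp

theorem pvFeed_append (l : List Int) (x : Int) :
    pvFeed (l ++ [x]) = pvFeed l ++ pvRow (l ++ [x]) := by
  simp [pvFeed, pvFeedRev, List.reverse_append]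

-- comprobar folded over a list computes the running max and the count of its occurrences
theorem pvComprobar_foldl (l : List Int) : ∀ (m c : Int),
    l.foldl pvComprobar (m, c) =
      (l.foldl max m,
        if l.foldl max m = m then c + (l.count m : Int)
        else ((l.count (l.foldl max m) : Nat) : Int)) := by
  induction l with
  | nil => intro m c; simp
  | cons x t ih =>
    intro m c
    have hx := (PySem.List.le_foldl_max t x).1
    have hm := (PySem.List.le_foldl_max t m).1
    by_cases h1 : x > m
    · have hmx : max m x = x := by omega
      simp only [List.foldl_cons, pvComprobar, if_pos h1, hmx, ih x 1, List.count_cons]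
      have hne : t.foldl max x ≠ m := by omega
      simp only [if_neg hne]
      by_cases h2 : t.foldl max x = x
      · simp [h2]
        omega
      · simp [h2, Ne.symm h2]
    · by_cases h0 : x = m
      · subst h0
        rw [List.foldl_cons, List.foldl_cons,
          show pvComprobar (x, c) x = (x, c + 1) from by simp [pvComprobar],
          show max x x = x from by omega, ih x (c + 1)]
        by_cases h2 : t.foldl max x = x
        · simp [h2, List.count_cons]
          omega
        · simp [h2, Ne.symm h2, List.count_cons]
      · have hmx : max m x = m := by omega
        simp only [List.foldl_cons, pvComprobar, if_neg h1, if_neg h0, hmx, ih m c,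
          List.count_cons]
        by_cases h2 : t.foldl max m = m
        · simp [h2, Ne.symm h0]; omega
        · have : t.foldl max m ≠ x := by omega
          simp [h2, this, Ne.symm this]

-- A's inner loop: updates the tail of sumas past 'done' and feeds each updated value
theorem pvInner_loop (x : Int) : ∀ (rest done : List Int) (m : Int × Int),
    (PySem.List.pyRange (done.length : Int) ((done.length : Int) + (rest.length : Int)) 1).foldl
        (pvInnerStep x) (done ++ rest, m)
      = (done ++ rest.map (fun v => v + x), (rest.map (fun v => v + x)).foldl pvComprobar m) := by
  intro rest
  induction rest with
  | nil => intro done m; simp [PySem.List.pyRange]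
  | cons r t ih =>
    intro done m
    have hlt : (done.length : Int) < (done.length : Int) + ((r :: t).length : Int) := by
      simp
    rw [PySem.List.pyRange_one_cons hlt]
    simp only [List.foldl_cons]
    have hget : PySem.List.pyGetD (done ++ r :: t) (done.length : Int) 0 = r := by
      rw [PySem.List.pyGetD_natCast]
      simp [List.getD_eq_getElem?_getD, List.getElem?_append_right (le_refl done.length)]
    have hset : PySem.List.pySetD (done ++ r :: t) (done.length : Int) (r + x)
        = done ++ (r + x) :: t := by
      rw [PySem.List.pySetD_natCast]
      rw [List.set_append_right _ _ (le_refl done.length)]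
      simp
    have hget2 : PySem.List.pyGetD (done ++ (r + x) :: t) (done.length : Int) 0 = r + x := by
      rw [PySem.List.pyGetD_natCast]
      simp [List.getD_eq_getElem?_getD, List.getElem?_append_right (le_refl done.length)]
    have hstep : pvInnerStep x (done ++ r :: t, m) (done.length : Int)
        = (done ++ (r + x) :: t, pvComprobar m (r + x)) := by
      simp only [pvInnerStep, hget, hset, hget2]
    rw [hstep]
    have harg : ((done.length : Int) + 1) = (((done ++ [r + x]).length : Nat) : Int) := by
      simp
    have harg2 : ((done.length : Int) + ((r :: t).length : Int))
        = (((done ++ [r + x]).length : Nat) : Int) + ((t.length : Nat) : Int) := by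
      simp; omega
    rw [show done ++ (r + x) :: t = (done ++ [r + x]) ++ t by simp]
    rw [harg, harg2, ih (done ++ [r + x]) (pvComprobar m (r + x))]
    simp

-- A's outer loop maintains sumas = pvRow and m = comprobar folded over pvFeed
theorem pvA_fold (l : List Int) :
    l.foldl pvAStep ([], -1000000001, 0)
      = (pvRow l, (pvFeed l).foldl pvComprobar (-1000000001, 0)) := by
  induction l using List.reverseRecOn with
  | nil => simp [pvRow, pvPrefs, pvFeed, pvFeedRev]
  | append_singleton l x ih =>
    rw [List.foldl_append, ih]
    simp only [List.foldl_cons, List.foldl_nil]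
    have := pvInner_loop x (pvRow l) [] ((pvFeed l).foldl pvComprobar (-1000000001, 0))
    simp only [List.nil_append, List.length_nil, Nat.cast_zero, Int.zero_add] at this
    simp only [pvAStep]
    rw [this]
    rw [pvFeed_append, pvRow_append, List.foldl_append, List.foldl_append]
    simp

-- folding (max acc (c - y)) relates to folding min over the y's
theorem pvL2 (P : List Int) : ∀ (b c : Int),
    P.foldl (fun acc y => max acc (c - y)) b = max b (c - P.foldl min (c - b)) := by
  induction P with
  | nil => intro b c; simp
  | cons y t ih =>
    intro b c
    simp only [List.foldl_cons]
    rw [ih (max b (c - y)) c]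
    have e1 : c - max b (c - y) = min (c - b) y := by omega
    rw [e1]
    have hK := (PySem.List.foldl_min_le t (min (c - b) y)).1
    omega

theorem pvL4 (t : List Int) : ∀ (a b : Int),
    t.foldl min (min a b) = min a (t.foldl min b) := by
  induction t with
  | nil => intro a b; simp
  | cons y s ih =>
    intro a b
    simp only [List.foldl_cons]
    rw [show min (min a b) y = min a (min b y) by omega, ih]

-- counting in a (c - ·) image
theorem pvL6 (P : List Int) (c v : Int) :
    (P.map (fun y => c - y)).count v = P.count (c - v) := by
  induction P with
  | nil => simp
  | cons y t ih =>
    simp only [List.map_cons, List.count_cons, ih]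
    by_cases h : y = c - v
    · simp [h]
    · have : c - y ≠ v := by omega
      simp [h, this]

-- B pass 1 invariant
theorem pvB1_fold (l : List Int) :
    l.foldl pvB1 (-1000000001, 0, 0)
      = ((pvFeed l).foldl max (-1000000001), l.sum,
          (pvPrefs l ++ [l.sum]).foldl min 0) := by
  induction l using List.reverseRecOn with
  | nil => simp [pvFeed, pvFeedRev, pvPrefs]
  | append_singleton l x ih =>
    rw [List.foldl_append, ih]
    simp only [List.foldl_cons, List.foldl_nil]
    have hsum : (l ++ [x]).sum = l.sum + x := by simp
    have hmn : (pvPrefs (l ++ [x]) ++ [(l ++ [x]).sum]).foldl min 0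
        = min ((pvPrefs l ++ [l.sum]).foldl min 0) (l.sum + x) := by
      rw [pvPrefs_append, List.foldl_append]
      simp [hsum]
    have hbest : (pvFeed (l ++ [x])).foldl max (-1000000001)
        = max ((pvFeed l).foldl max (-1000000001))
            ((l.sum + x) - (pvPrefs l ++ [l.sum]).foldl min 0) := by
      rw [pvFeed_append, List.foldl_append]
      set B := (pvFeed l).foldl max (-1000000001) with hB
      set MN := (pvPrefs l ++ [l.sum]).foldl min 0 with hMN
      have : pvRow (l ++ [x]) = (pvPrefs (l ++ [x])).map (fun y => (l.sum + x) - y) := by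
        simp [pvRow, hsum]
      rw [this, List.foldl_map, pvL2, pvPrefs_append, pvPrefs_sum_eq]
      simp only [List.foldl_cons]
      rw [pvL4]
      have h0 : (pvNpp l).foldl min 0 ≤ 0 := (PySem.List.foldl_min_le (pvNpp l) 0).1
      have hMN' : MN = (pvNpp l).foldl min 0 := by
        rw [hMN, pvPrefs_sum_eq]
        simp only [List.foldl_cons]
        rw [show min (0 : Int) 0 = 0 by omega]
      rw [hMN']
      omega
    unfold pvB1
    simp only
    rw [hbest, hmn, hsum]
    simp only [Prod.mk.injEq]
    refine ⟨by omega, by simp, by omega⟩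

-- B pass 2 invariant: seen is the counter of the nonempty prefix sums, cnt counts best in pvFeed
theorem pvB2_fold (best : Int) (l : List Int) :
    l.foldl (pvB2 best) (0, 0, PySem.Dict.empty.insert 0 1)
      = (((pvFeed l).count best : Int), l.sum,
          (pvNpp l).foldl (fun d y => d.insert y (d.getD y 0 + 1))
            (PySem.Dict.empty.insert 0 1)) := by
  induction l using List.reverseRecOn with
  | nil => simp [pvFeed, pvFeedRev, pvNpp, pvPrefs]
  | append_singleton l x ih =>
    rw [List.foldl_append, ih]
    simp only [List.foldl_cons, List.foldl_nil]
    have hsum : (l ++ [x]).sum = l.sum + x := by simp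
    have hseen : ∀ v : Int,
        ((pvNpp l).foldl (fun d y => d.insert y (d.getD y 0 + 1))
            (PySem.Dict.empty.insert 0 1)).getD v 0
          = ((pvPrefs (l ++ [x])).count v : Int) := by
      intro v
      rw [PySem.Dict.getD_foldl_insert_add_one]
      rw [pvPrefs_append, pvPrefs_sum_eq, List.count_cons]
      rw [PySem.Dict.getD_insert]
      by_cases h : v = 0
      · simp [h]
        omega
      · simp [h, Ne.symm h, PySem.Dict.getD_empty]
    have hcnt : ((pvFeed l).count best : Int)
          + ((pvPrefs (l ++ [x])).count (l.sum + x - best) : Int)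
        = ((pvFeed (l ++ [x])).count best : Int) := by
      rw [pvFeed_append, List.count_append]
      have : pvRow (l ++ [x]) = (pvPrefs (l ++ [x])).map (fun y => (l.sum + x) - y) := by
        simp [pvRow, hsum]
      rw [this, pvL6]
      push_cast
      ring
    have hnpp : pvNpp (l ++ [x]) = pvNpp l ++ [l.sum + x] := by
      rw [pvNpp_append, hsum]
    unfold pvB2
    simp only [Prod.mk.injEq]
    refine ⟨?_, by simp, ?_⟩
    · rw [hseen (l.sum + x - best)]
      exact hcnt
    · rw [hnpp, List.foldl_append]
      simp only [List.foldl_cons, List.foldl_nil]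

-- ===== VERDICT (by name: the statement is the Claim_ definition above) =====
theorem max_sum_sq_spec : Claim_equal_max_sum_sq := by
  intro nros _
  unfold Spec_max_sum_sq max_sum_sq max_sum_sq_alt
  simp only [pvA_fold, pvB1_fold, pvB2_fold, pvComprobar_foldl]
  by_cases h : (pvFeed nros).foldl max (-1000000001) = (-1000000001 : Int)
  · rw [if_pos h, h]
    simp
  · rw [if_neg h]
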